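-- pv_equiv track=rewrite | github.com/amartinez228/longest-unimodal | unimodal.py | compute_dec
-- ===== SOURCE A (Python) =====
-- def compute_dec(arr):
--     """
--     Compute DEC array: length of longest strictly decreasing subsequence
--     starting at each position.
--
--     Args:
--         arr: List of integers
--
--     Returns:
--         List where DEC[j] = length of longest strictly decreasing
--         subsequence starting at position j
--     """
--     n = len(arr)
--     DEC = [1] * n  # Initialize all positions to 1
--
--     for j in range(n - 2, -1, -1):  # Process from right to left
--         # Find the maximum DEC[i] where i > j and arr[j] > arr[i]
--         max_val = 0
--         for i in range(j + 1, n):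
--             if arr[j] > arr[i]:
--                 max_val = max(max_val, DEC[i])
--         DEC[j] = 1 + max_val
--     return DEC
-- ===== SOURCE B (Python) =====
-- def compute_dec(arr):
--     """Patience-sorting DP: scan the array right-to-left, keeping a sorted
--     'tails' list where tails[k] is the smallest value that starts a strictly
--     decreasing subsequence of length k+1 in the suffix seen so far; each
--     answer is found by binary search instead of an inner scan."""
--     tails = []
--     out = []
--     for x in reversed(arr):
--         # bisect_left(tails, x) by hand (no imports in this module)
--         lo, hi = 0, len(tails)
--         while lo < hi:
--             mid = (lo + hi) // 2
--             if tails[mid] < x: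
--                 lo = mid + 1
--             else:
--                 hi = mid
--         d = lo + 1
--         if lo == len(tails):
--             tails.append(x)
--         else:
--             tails[lo] = x
--         out.append(d)
--     out.reverse()
--     return out
-- ===== Notes on version B (the rewrite author's own statement) =====
-- stated objective: faster
-- what changed: Replaced the O(n^2) right-to-left DP with an inner linear scan by a patience-sorting pass: one right-to-left sweep maintaining a sorted 'tails' array queried and updated by hand-written binary search.
import Mathlib
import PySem

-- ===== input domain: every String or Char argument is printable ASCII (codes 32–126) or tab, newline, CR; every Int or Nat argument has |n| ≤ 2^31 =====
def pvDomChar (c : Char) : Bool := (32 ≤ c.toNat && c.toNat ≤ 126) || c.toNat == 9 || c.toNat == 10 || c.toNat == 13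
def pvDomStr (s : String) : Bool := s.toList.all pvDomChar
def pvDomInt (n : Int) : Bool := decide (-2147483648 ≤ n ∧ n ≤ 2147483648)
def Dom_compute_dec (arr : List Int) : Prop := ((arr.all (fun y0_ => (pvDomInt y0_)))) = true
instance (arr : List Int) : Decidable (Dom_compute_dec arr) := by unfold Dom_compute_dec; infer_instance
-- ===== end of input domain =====

-- B replaces A's O(n^2) right-to-left DP (inner scan per index) by one patience-sorting
-- sweep with binary search over a sorted tails list.

-- ===== PORT A =====
def compute_dec (arr : List Int) : List Int :=
  let n : Int := (arr.length : Int)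
  let DEC : List Int := PySem.List.pyRepeat [1] n
  (PySem.List.pyRange (n - 2) (-1) (-1)).foldl (fun DEC j =>
      let max_val : Int :=
        (PySem.List.pyRange (j + 1) n 1).foldl (fun max_val i =>
            if PySem.List.pyGetD arr j 0 > PySem.List.pyGetD arr i 0 then
              max max_val (PySem.List.pyGetD DEC i 0)
            else max_val) 0
      PySem.List.pySetD DEC j (1 + max_val)) DEC

-- ===== PORT B =====
-- hand-written bisect_left of Source B (the 'while lo < hi' loop)
def bisectLoop (tails : List Int) (x : Int) (lo hi : Int) : Int :=
  if h : lo < hi then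
    let mid := PySem.Int.floordiv (lo + hi) 2
    if PySem.List.pyGetD tails mid 0 < x then bisectLoop tails x (mid + 1) hi
    else bisectLoop tails x lo mid
  else lo
termination_by (hi - lo).toNat
decreasing_by
  · have h1 := PySem.Int.floordiv_two_mid_bounds (le_of_lt h)
    have h2 : PySem.Int.floordiv (lo + hi) 2 < hi := by
      rw [PySem.Int.floordiv_eq_ediv_of_pos (by norm_num)]; omega
    omega
  · have h1 := PySem.Int.floordiv_two_mid_bounds (le_of_lt h)
    have h3 : PySem.Int.floordiv (lo + hi) 2 < hi := by
      rw [PySem.Int.floordiv_eq_ediv_of_pos (by norm_num)]; omega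
    omega

-- loop body of Source B's single pass (state = (tails, out))
def bStep (st : List Int × List Int) (x : Int) : List Int × List Int :=
  let tails := st.1
  let out := st.2
  let lo := bisectLoop tails x 0 (tails.length : Int)
  let d := lo + 1
  let tails' := if lo = (tails.length : Int) then tails ++ [x]
                else PySem.List.pySetD tails lo x
  (tails', out ++ [d])

def compute_dec_alt (arr : List Int) : List Int :=
  ((arr.reverse.foldl bStep ([], [])).2).reverse

-- ===== PRECONDITION & SPEC =====
def Spec_compute_dec (arr : List Int) (out : List Int) : Prop := out = compute_dec_alt arr
instance (arr : List Int) (out : List Int) : Decidable (Spec_compute_dec arr out) := by unfold Spec_compute_dec; infer_instance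

-- ===== CLAIM (what is proved, stated in full; the proofs are below) =====
def Claim_equal_compute_dec : Prop := ∀ (arr : List Int), Dom_compute_dec arr → Spec_compute_dec arr (compute_dec arr)

-- ===== LEMMAS AND PROOFS =====

def maxBelow : List (Int × Int) → Int → Int
  | [], _ => 0
  | p :: ps, x => if p.1 < x then max (maxBelow ps x) p.2 else maxBelow ps x

def decF : List Int → List Int
  | [] => []
  | x :: rest => (1 + maxBelow (rest.zip (decF rest)) x) :: decF rest

theorem maxBelow_nonneg (ps : List (Int × Int)) (x : Int) : 0 ≤ maxBelow ps x := by
  induction ps with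
  | nil => simp [maxBelow]
  | cons p ps ih => simp only [maxBelow]; split_ifs <;> omega

theorem foldl_maxBelow (x : Int) (ps : List (Int × Int)) : ∀ a : Int, 0 ≤ a →
    ps.foldl (fun m p => if p.1 < x then max m p.2 else m) a = max a (maxBelow ps x) := by
  induction ps with
  | nil => intro a ha; simp [maxBelow]; omega
  | cons p ps ih =>
    intro a ha
    simp only [List.foldl_cons, maxBelow]
    by_cases h : p.1 < x
    · simp only [if_pos h]; rw [ih (max a p.2) (by omega)]; omega
    · simp only [if_neg h]; exact ih a ha

theorem decF_length (l : List Int) : (decF l).length = l.length := by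
  induction l with
  | nil => rfl
  | cons x rest ih => simp [decF, ih]

theorem foldl_pyRange_two (arr DEC : List Int) (hlen : DEC.length = arr.length)
    (g : Int → Int → Int → Int) :
    ∀ (k : Nat), k ≤ arr.length → ∀ a : Int,
    (PySem.List.pyRange (k : Int) (arr.length : Int) 1).foldl
        (fun m i => g m (PySem.List.pyGetD arr i 0) (PySem.List.pyGetD DEC i 0)) a
      = ((arr.drop k).zip (DEC.drop k)).foldl (fun m p => g m p.1 p.2) a := by
  intro k hk
  induction hm : arr.length - k generalizing k with
  | zero =>
    intro a
    have hk' : k = arr.length := by omega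
    subst hk'
    rw [PySem.List.pyRange_one_eq_nil (by omega)]
    simp
  | succ m ih =>
    intro a
    have hk' : k < arr.length := by omega
    rw [PySem.List.pyRange_one_cons (by exact_mod_cast hk')]
    rw [List.drop_eq_getElem_cons hk', List.drop_eq_getElem_cons (by omega : k < DEC.length)]
    simp only [List.zip_cons_cons, List.foldl_cons]
    rw [PySem.List.pyGetD_ofNat arr k 0 hk', PySem.List.pyGetD_ofNat DEC k 0 (by omega)]
    have : ((k : Int) + 1) = ((k + 1 : Nat) : Int) := by push_cast; ring
    rw [this, ih (k+1) (by omega) (by omega)]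

def Abody (arr : List Int) (DEC : List Int) (j : Int) : List Int :=
  let max_val : Int :=
    (PySem.List.pyRange (j + 1) ((arr.length : Int)) 1).foldl (fun max_val i =>
        if PySem.List.pyGetD arr j 0 > PySem.List.pyGetD arr i 0 then
          max max_val (PySem.List.pyGetD DEC i 0)
        else max_val) 0
  PySem.List.pySetD DEC j (1 + max_val)

theorem stepA (arr : List Int) (p : Nat) (hp : p + 1 ≤ arr.length) :
    Abody arr (List.replicate (p+1) (1:Int) ++ decF (arr.drop (p+1))) (p : Int)
      = List.replicate p 1 ++ decF (arr.drop p) := by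
  have hplt : p < arr.length := by omega
  set DEC := List.replicate (p+1) (1:Int) ++ decF (arr.drop (p+1)) with hDEC
  have hlen : DEC.length = arr.length := by
    simp [hDEC, decF_length]; omega
  unfold Abody
  have hcast : ((p : Int) + 1) = ((p + 1 : Nat) : Int) := by push_cast; ring
  rw [PySem.List.pyGetD_ofNat arr p 0 hplt]
  rw [hcast, foldl_pyRange_two arr DEC hlen (fun m v d => if arr[p] > v then max m d else m) (p+1) (by omega) 0]
  have hdropDEC : DEC.drop (p+1) = decF (arr.drop (p+1)) := by
    rw [hDEC]
    exact List.drop_left' (by simp)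
  rw [hdropDEC]
  rw [foldl_maxBelow (arr[p]) _ 0 (le_refl 0)]
  rw [max_eq_right (maxBelow_nonneg _ _)]
  rw [PySem.List.pySetD_natCast]
  have hset : DEC.set p (1 + maxBelow ((arr.drop (p+1)).zip (decF (arr.drop (p+1)))) arr[p])
      = List.replicate p 1 ++ (1 + maxBelow ((arr.drop (p+1)).zip (decF (arr.drop (p+1)))) arr[p]) :: decF (arr.drop (p+1)) := by
    rw [hDEC, List.set_append]
    simp only [List.length_replicate, Nat.lt_succ_self, if_pos]
    rw [List.replicate_succ', List.set_append]
    simp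
  rw [hset]
  congr 1
  rw [List.drop_eq_getElem_cons hplt]
  rfl

theorem outerA (arr : List Int) : ∀ (j : Nat), j + 1 ≤ arr.length →
    (PySem.List.pyRange (j : Int) (-1) (-1)).foldl (Abody arr)
        (List.replicate (j+1) 1 ++ decF (arr.drop (j+1))) = decF arr := by
  intro j
  induction j with
  | zero =>
    intro hj
    rw [PySem.List.pyRange_neg_one_cons (by norm_num)]
    rw [PySem.List.pyRange_neg_one_eq_nil (by norm_num)]
    simp only [List.foldl_cons, List.foldl_nil]
    rw [stepA arr 0 hj]
    simp
  | succ j ih =>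
    intro hj
    have hcast : ((j+1 : Nat) : Int) = (j : Int) + 1 := by push_cast; ring
    rw [hcast, PySem.List.pyRange_neg_one_cons (by omega)]
    simp only [List.foldl_cons, add_sub_cancel_right]
    rw [← hcast, stepA arr (j+1) hj]
    exact ih (by omega)

theorem compute_dec_fold (arr : List Int) : compute_dec arr = decF arr := by
  show (PySem.List.pyRange ((arr.length : Int) - 2) (-1) (-1)).foldl (Abody arr)
      (PySem.List.pyRepeat [1] (arr.length : Int)) = decF arr
  rw [PySem.List.pyRepeat_singleton]
  have hrep : ((arr.length : Int)).toNat = arr.length := by omega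
  rw [hrep]
  match harr : arr with
  | [] =>
    rw [PySem.List.pyRange_neg_one_eq_nil (by simp)]
    simp [decF]
  | [x] =>
    rw [PySem.List.pyRange_neg_one_eq_nil (by simp)]
    simp [decF, maxBelow]
  | x :: y :: rest =>
    rw [← harr]
    have hlen : 2 ≤ arr.length := by rw [harr]; simp
    have hcast : ((arr.length : Int) - 2) = ((arr.length - 2 : Nat) : Int) := by omega
    rw [hcast]
    have hinit : List.replicate arr.length (1:Int)
        = List.replicate ((arr.length - 2) + 1) 1 ++ decF (arr.drop ((arr.length - 2) + 1)) := by
      have h1 : arr.length - 2 + 1 = arr.length - 1 := by omega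
      have h2 : arr.length - 1 < arr.length := by omega
      have h3 : arr.drop (arr.length - 1 + 1) = [] := by
        apply List.drop_eq_nil_of_le; omega
      rw [h1, List.drop_eq_getElem_cons h2, h3]
      have h4 : List.replicate arr.length (1:Int) = List.replicate (arr.length-1) (1:Int) ++ [1] := by
        conv_lhs => rw [show arr.length = (arr.length - 1) + 1 from by omega]
        rw [List.replicate_succ']
      rw [h4]
      simp [decF, maxBelow]
    rw [hinit, outerA arr (arr.length - 2) (by omega)]

def cntLt (tails : List Int) (x : Int) : Nat := tails.countP (fun v => decide (v < x))

theorem cntLt_le_length (tails : List Int) (x : Int) : cntLt tails x ≤ tails.length :=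
  List.countP_le_length ..

-- in a sorted list, the elements < x are exactly the first (cntLt tails x) ones
theorem sorted_lt_iff (tails : List Int) (hs : List.Pairwise (· < ·) tails) (x : Int) :
    ∀ k, (hk : k < tails.length) → (tails[k] < x ↔ k < cntLt tails x) := by
  induction tails with
  | nil => intro k hk; simp at hk
  | cons t ts ih =>
    have hts := (List.pairwise_cons.mp hs).2
    have hmem := (List.pairwise_cons.mp hs).1
    intro k hk
    by_cases h : t < x
    · have hc : cntLt (t :: ts) x = cntLt ts x + 1 := by
        simp [cntLt, h]
      cases k with
      | zero => simpa [hc] using h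
      | succ k =>
        simp only [List.getElem_cons_succ, hc]
        rw [ih hts k (by simpa using hk)]
        omega
    · have hzero : cntLt ts x = 0 := by
        rw [cntLt, List.countP_eq_zero]
        intro v hv
        simp only [decide_eq_true_eq]
        have := hmem v hv
        omega
      have hc : cntLt (t :: ts) x = 0 := by
        have heq : cntLt (t :: ts) x = cntLt ts x := by simp [cntLt, h]
        rw [heq, hzero]
      rw [hc]
      cases k with
      | zero => simpa using h
      | succ k =>
        simp only [List.getElem_cons_succ]
        constructor
        · intro hlt
          have := hmem (ts[k]'(by simpa using hk)) (List.getElem_mem _)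
          omega
        · omega

theorem bisect_eq (tails : List Int) (x : Int) (hs : List.Pairwise (· < ·) tails) :
    ∀ (n : Nat) (lo hi : Int), (hi - lo).toNat = n → 0 ≤ lo → lo ≤ (cntLt tails x : Int) →
      (cntLt tails x : Int) ≤ hi → hi ≤ (tails.length : Int) →
    bisectLoop tails x lo hi = (cntLt tails x : Int) := by
  intro n
  induction n using Nat.strong_induction_on with
  | _ n ih =>
    intro lo hi hn h0 hlo hhi hlen
    rw [bisectLoop]
    by_cases h : lo < hi
    · rw [dif_pos h]
      have hb := PySem.Int.floordiv_two_mid_bounds (le_of_lt h)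
      have hmlt : PySem.Int.floordiv (lo + hi) 2 < hi := by
        rw [PySem.Int.floordiv_eq_ediv_of_pos (by norm_num)]; omega
      set mid := PySem.Int.floordiv (lo + hi) 2 with hmid
      have hmid0 : 0 ≤ mid := by omega
      have hmidlen : mid.toNat < tails.length := by omega
      have hget : PySem.List.pyGetD tails mid 0 = tails[mid.toNat] := by
        have hh := PySem.List.pyGetD_ofNat tails mid.toNat 0 hmidlen
        rwa [Int.toNat_of_nonneg hmid0] at hh
      simp only [hget]
      have hiff := sorted_lt_iff tails hs x mid.toNat hmidlen
      by_cases hcmp : tails[mid.toNat] < x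
      · rw [if_pos hcmp]
        have hlt : mid.toNat < cntLt tails x := hiff.mp hcmp
        exact ih (hi - (mid+1)).toNat (by omega) (mid+1) hi rfl (by omega) (by omega) hhi hlen
      · rw [if_neg hcmp]
        have hge : ¬ (mid.toNat < cntLt tails x) := fun hh => hcmp (hiff.mpr hh)
        exact ih (mid - lo).toNat (by omega) lo mid rfl h0 hlo (by omega) (by omega)
    · rw [dif_neg h]; omega

theorem update_append (tails : List Int) (x : Int) (hs : List.Pairwise (· < ·) tails)
    (hc : cntLt tails x = tails.length) :
    List.Pairwise (· < ·) (tails ++ [x]) ∧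
      ∀ y, cntLt (tails ++ [x]) y = max (cntLt tails y) (if x < y then cntLt tails x + 1 else 0) := by
  have hall : ∀ v ∈ tails, v < x := by
    intro v hv
    obtain ⟨k, hk, rfl⟩ := List.mem_iff_getElem.mp hv
    exact (sorted_lt_iff tails hs x k hk).mpr (by omega)
  constructor
  · rw [List.pairwise_append]
    exact ⟨hs, List.pairwise_singleton _ _, fun a ha b hb => by
      simp only [List.mem_singleton] at hb; subst hb; exact hall a ha⟩
  · intro y
    have happ : cntLt (tails ++ [x]) y = cntLt tails y + (if x < y then 1 else 0) := by
      simp [cntLt, List.countP_append, List.countP_cons]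
    rw [happ]
    by_cases hxy : x < y
    · have hlen : cntLt tails y = tails.length := by
        rw [cntLt, List.countP_eq_length]
        intro v hv
        simp only [decide_eq_true_eq]
        exact lt_trans (hall v hv) hxy
      simp only [if_pos hxy]
      omega
    · simp only [if_neg hxy]
      omega

theorem update_set (tails : List Int) (x : Int) (hs : List.Pairwise (· < ·) tails)
    (hc : cntLt tails x < tails.length) :
    List.Pairwise (· < ·) (tails.set (cntLt tails x) x) ∧
      ∀ y, cntLt (tails.set (cntLt tails x) x) y
            = max (cntLt tails y) (if x < y then cntLt tails x + 1 else 0) := by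
  set c := cntLt tails x with hcdef
  have hxc : ¬ tails[c] < x := by
    rw [sorted_lt_iff tails hs x c hc]; omega
  have htake : ∀ v ∈ tails.take c, v < x := by
    intro v hv
    obtain ⟨k, hk, rfl⟩ := List.mem_iff_getElem.mp hv
    have hk' : k < c ∧ k < tails.length := by simpa using hk
    rw [List.getElem_take]
    exact (sorted_lt_iff tails hs x k (by omega)).mpr (by omega)
  have hdrop : ∀ v ∈ tails.drop (c+1), tails[c] < v := by
    intro v hv
    obtain ⟨k, hk, rfl⟩ := List.mem_iff_getElem.mp hv
    have hk' : k < tails.length - (c+1) := by simpa using hk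
    rw [List.getElem_drop]
    exact (List.pairwise_iff_getElem.mp hs) c (c+1+k) hc (by omega) (by omega)
  have hset : tails.set c x = tails.take c ++ x :: tails.drop (c+1) := by
    rw [List.set_eq_take_append_cons_drop, if_pos hc]
  have htails : tails = tails.take c ++ tails[c] :: tails.drop (c+1) := by
    conv_lhs => rw [← List.take_append_drop c tails, List.drop_eq_getElem_cons hc]
  constructor
  · rw [hset, List.pairwise_append]
    refine ⟨hs.sublist (List.take_sublist ..), ?_, ?_⟩
    · rw [List.pairwise_cons]
      refine ⟨fun v hv => lt_of_le_of_lt (by omega) (hdrop v hv), hs.sublist ?_⟩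
      exact (List.drop_sublist ..)
    · intro a ha b hb
      rcases List.mem_cons.mp hb with rfl | hb
      · exact htake a ha
      · exact lt_trans (htake a ha) (lt_of_le_of_lt (by omega) (hdrop b hb))
  · intro y
    have hL : cntLt (tails.set c x) y
        = cntLt (tails.take c) y + ((if x < y then 1 else 0) + cntLt (tails.drop (c+1)) y) := by
      rw [hset]
      simp only [cntLt, List.countP_append, List.countP_cons, decide_eq_true_eq]
      split_ifs <;> omega
    have hM : cntLt tails y
        = cntLt (tails.take c) y + ((if tails[c] < y then 1 else 0) + cntLt (tails.drop (c+1)) y) := by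
      conv_lhs => rw [htails]
      simp only [cntLt, List.countP_append, List.countP_cons, decide_eq_true_eq]
      split_ifs <;> omega
    by_cases hxy : x < y
    · by_cases hcy : tails[c] < y
      · have hcm : c < cntLt tails y := by
          rw [← sorted_lt_iff tails hs y c hc]; exact hcy
        rw [hL]
        rw [hM] at hcm ⊢
        simp only [if_pos hxy, if_pos hcy] at hcm ⊢
        omega
      · have hA : cntLt (tails.take c) y = c := by
          have hlen : (tails.take c).length = c := by rw [List.length_take]; omega
          rw [cntLt]
          conv_rhs => rw [← hlen]
          rw [List.countP_eq_length]
          intro v hv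
          simp only [decide_eq_true_eq]
          exact lt_trans (htake v hv) hxy
        have hB : cntLt (tails.drop (c+1)) y = 0 := by
          rw [cntLt, List.countP_eq_zero]
          intro v hv
          simp only [decide_eq_true_eq]
          have := hdrop v hv
          omega
        rw [hL, hM]
        simp only [if_pos hxy, if_neg hcy]
        rw [hA, hB]
        omega
    · have hcy : ¬ tails[c] < y := by omega
      rw [hL, hM]
      simp only [if_neg hxy, if_neg hcy]
      have := cntLt_le_length tails y
      omega

def BInv (s tails out : List Int) : Prop :=
  out = (decF s).reverse ∧ List.Pairwise (· < ·) tails ∧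
    ∀ y, (cntLt tails y : Int) = maxBelow (s.zip (decF s)) y

theorem bStep_inv (s tails out : List Int) (x : Int) (h : BInv s tails out) :
    BInv (x :: s) (bStep (tails, out) x).1 (bStep (tails, out) x).2 := by
  obtain ⟨hout, hs, hcnt⟩ := h
  have hbis : bisectLoop tails x 0 (tails.length : Int) = (cntLt tails x : Int) := by
    have hle := cntLt_le_length tails x
    exact bisect_eq tails x hs _ 0 (tails.length : Int) rfl (by omega) (by omega) (by omega) (by omega)
  set c := cntLt tails x with hcdef
  have hd : (c : Int) + 1 = 1 + maxBelow (s.zip (decF s)) x := by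
    rw [hcnt x]; ring
  have hzip : (x :: s).zip (decF (x :: s))
      = (x, 1 + maxBelow (s.zip (decF s)) x) :: s.zip (decF s) := by
    simp [decF]
  have hbstep : bStep (tails, out) x
      = (if (c : Int) = (tails.length : Int) then tails ++ [x]
         else PySem.List.pySetD tails (c : Int) x, out ++ [(c : Int) + 1]) := by
    simp only [bStep, hbis]
  have hout' : (bStep (tails, out) x).2 = (decF (x :: s)).reverse := by
    rw [hbstep]
    simp only [decF, List.reverse_cons, hout, hd]
  by_cases hcl : c = tails.length
  · have hcast : (c : Int) = (tails.length : Int) := by exact_mod_cast hcl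
    obtain ⟨hp, hcnt'⟩ := update_append tails x hs hcl
    have htl : (bStep (tails, out) x).1 = tails ++ [x] := by rw [hbstep]; simp [hcast]
    refine ⟨hout', ?_, ?_⟩
    · rw [htl]; exact hp
    · intro y
      rw [htl, hcnt' y, hzip]
      simp only [maxBelow]
      by_cases hxy : x < y
      · simp only [if_pos hxy]
        push_cast
        rw [hcnt y, hd]
      · simp only [if_neg hxy]
        push_cast
        rw [hcnt y]
        have := maxBelow_nonneg (s.zip (decF s)) y
        omega
  · have hclt : c < tails.length := lt_of_le_of_ne (cntLt_le_length tails x) hcl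
    have hcast : ¬ ((c : Int) = (tails.length : Int)) := by exact_mod_cast hcl
    obtain ⟨hp, hcnt'⟩ := update_set tails x hs hclt
    have htl : (bStep (tails, out) x).1 = tails.set c x := by
      rw [hbstep]; simp [hcast]
    refine ⟨hout', ?_, ?_⟩
    · rw [htl]; exact hp
    · intro y
      rw [htl, hcnt' y, hzip]
      simp only [maxBelow]
      by_cases hxy : x < y
      · simp only [if_pos hxy]
        push_cast
        rw [hcnt y, hd]
      · simp only [if_neg hxy]
        push_cast
        rw [hcnt y]
        have := maxBelow_nonneg (s.zip (decF s)) y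
        omega

theorem bfold_inv (rs : List Int) : ∀ (s tails out : List Int), BInv s tails out →
    BInv (rs.reverse ++ s) (rs.foldl bStep (tails, out)).1 (rs.foldl bStep (tails, out)).2 := by
  induction rs with
  | nil => intro s tails out h; simpa using h
  | cons r rs ih =>
    intro s tails out h
    simp only [List.foldl_cons, List.reverse_cons, List.append_assoc, List.singleton_append]
    exact ih (r :: s) _ _ (bStep_inv s tails out r h)


theorem compute_dec_eq_decF (arr : List Int) : compute_dec arr = decF arr :=
  compute_dec_fold arr

theorem compute_dec_alt_eq_decF (arr : List Int) : compute_dec_alt arr = decF arr := by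
  have h0 : BInv [] [] [] :=
    ⟨rfl, List.Pairwise.nil, fun y => by simp [cntLt, decF, maxBelow]⟩
  have hinv := bfold_inv arr.reverse [] [] [] h0
  rw [List.reverse_reverse, List.append_nil] at hinv
  obtain ⟨hout, -, -⟩ := hinv
  unfold compute_dec_alt
  rw [hout, List.reverse_reverse]

-- ===== VERDICT (by name: the statement is the Claim_ definition above) =====
theorem compute_dec_spec : Claim_equal_compute_dec := by
  intro arr _
  unfold Spec_compute_dec
  rw [compute_dec_eq_decF, compute_dec_alt_eq_decF]
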